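-- pv_equiv track=rewrite | github.com/code-study-classes/python-basics-ArtyMaly | practice_package/loops.py | count_vowel_triplets
-- ===== SOURCE A (Python) =====
-- def count_vowel_triplets(text):
--     text = text.lower()
--     vowels = "aeiouy"
--     count = 0
--
--     for i in range(len(text) - 2):
--         if text[i] in vowels and text[i + 1] in vowels and text[i + 2] in vowels:
--             count += 1
--
--     return count
-- ===== SOURCE B (Python) =====
-- def count_vowel_triplets(text):
--     vowels = set("aeiouy")
--     count = 0
--     run = 0
--     for ch in text.lower():
--         if ch in vowels:
--             run += 1
--             if run >= 3:
--                 count += 1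
--         else:
--             run = 0
--     return count
-- ===== Notes on version B (the rewrite author's own statement) =====
-- stated objective: faster
-- what changed: Replaces the index-based window scan (three membership tests and three indexings per position via text[i..i+2]) with a single pass over the characters maintaining a run-length counter of consecutive vowels, counting each character that extends a run to length >= 3 (one set-membership test per character, no indexing).
import Mathlib
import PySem

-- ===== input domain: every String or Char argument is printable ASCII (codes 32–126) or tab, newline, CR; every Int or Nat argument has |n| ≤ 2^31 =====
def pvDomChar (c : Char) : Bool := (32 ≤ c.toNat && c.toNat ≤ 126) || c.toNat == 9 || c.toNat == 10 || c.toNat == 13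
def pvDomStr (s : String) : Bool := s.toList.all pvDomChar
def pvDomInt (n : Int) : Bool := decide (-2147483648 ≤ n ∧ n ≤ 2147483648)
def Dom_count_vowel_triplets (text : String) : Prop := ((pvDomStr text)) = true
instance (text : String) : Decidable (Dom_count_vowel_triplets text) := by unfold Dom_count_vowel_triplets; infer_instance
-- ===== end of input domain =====

-- B replaces the per-position triple window check with a one-pass vowel run-length counter (alternative decomposition, same asymptotic cost).

-- ===== PORT A =====
-- vowels = "aeiouy" (membership of a single char in the string = list-of-chars membership)
def pvVowelsA : List Char := "aeiouy".toList

def count_vowel_triplets (text : String) : Int :=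
  let tl := (PySem.Str.lower text).toList
  (PySem.List.pyRange 0 ((tl.length : Int) - 2) 1).foldl
    (fun count i =>
      if pvVowelsA.contains (PySem.List.pyGetD tl i ' ')
          && pvVowelsA.contains (PySem.List.pyGetD tl (i + 1) ' ')
          && pvVowelsA.contains (PySem.List.pyGetD tl (i + 2) ' ')
      then count + 1 else count) 0

-- ===== PORT B =====
-- vowels = set("aeiouy")
def pvVowelsB : PySem.Set Char := PySem.Set.ofList "aeiouy".toList

def count_vowel_triplets_alt (text : String) : Int :=
  ((PySem.Str.lower text).toList.foldl
    (fun (st : Int × Int) ch =>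
      if PySem.Set.contains pvVowelsB ch then
        let run := st.1 + 1
        (run, if 3 ≤ run then st.2 + 1 else st.2)
      else (0, st.2)) ((0 : Int), (0 : Int))).2

-- ===== PRECONDITION & SPEC =====
def Spec_count_vowel_triplets (text : String) (out : Int) : Prop := out = count_vowel_triplets_alt text
instance (text : String) (out : Int) : Decidable (Spec_count_vowel_triplets text out) := by unfold Spec_count_vowel_triplets; infer_instance

-- ===== CLAIM (what is proved, stated in full; the proofs are below) =====
def Claim_equal_count_vowel_triplets : Prop := ∀ (text : String), Dom_count_vowel_triplets text → Spec_count_vowel_triplets text (count_vowel_triplets text)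

-- ===== LEMMAS AND PROOFS =====

def isV (c : Char) : Bool := pvVowelsA.contains c

-- structural triple count (proof-side reference)
def tcount : List Char → Int
  | a :: b :: c :: t => (if isV a && isV b && isV c then 1 else 0) + tcount (b :: c :: t)
  | _ => 0

-- B-side run counter (proof-side reference)
def bcount : Int → List Char → Int
  | _, [] => 0
  | r, c :: t => if isV c then (if 3 ≤ r + 1 then (1:Int) else 0) + bcount (r + 1) t else bcount 0 t

lemma isV_space : isV ' ' = false := by decide

lemma tcount_cons (a : Char) (t : List Char) :
    tcount (a :: t) =
      (if isV a && isV (t.getD 0 ' ') && isV (t.getD 1 ' ') then (1:Int) else 0) + tcount t := by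
  match t with
  | [] => simp [tcount, isV_space]
  | [b] => simp [tcount, isV_space]
  | b :: c :: t' => simp [tcount]

lemma tcount_short (l : List Char) (h : l.length < 3) : tcount l = 0 := by
  match l with
  | [] => rfl
  | [_] => rfl
  | [_, _] => rfl
  | _ :: _ :: _ :: _ => exact absurd h (by simp)

def e2 (l : List Char) : Int := if isV (l.getD 0 ' ') then 1 else 0
def e1 (l : List Char) : Int := if isV (l.getD 0 ' ') && isV (l.getD 1 ' ') then 1 else 0

lemma bcount_eq (l : List Char) : ∀ r : Int, 0 ≤ r →
    bcount r l = tcount l + (if 2 ≤ r then e2 l else 0) + (if 1 ≤ r then e1 l else 0) := by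
  induction l with
  | nil => intro r _; simp [bcount, tcount, e2, e1, isV_space]
  | cons a t ih =>
    intro r hr
    rw [tcount_cons]
    by_cases hv : isV a
    · have h1 : bcount r (a :: t) = (if 3 ≤ r + 1 then (1:Int) else 0) + bcount (r + 1) t := by
        simp [bcount, hv]
      rw [h1, ih (r + 1) (by omega)]
      simp only [e1, e2, hv, List.getD_cons_zero, List.getD_cons_succ, Bool.true_and, if_true]
      split_ifs <;> linarith
    · have h1 : bcount r (a :: t) = bcount 0 t := by
        simp [bcount, hv]
      rw [h1, ih 0 le_rfl]
      simp only [e1, e2, hv, List.getD_cons_zero, List.getD_cons_succ, Bool.false_and,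
        Bool.false_eq_true, if_false]
      norm_num

lemma foldB (l : List Char) : ∀ (r cnt : Int),
    (l.foldl (fun (st : Int × Int) ch =>
        if PySem.Set.contains pvVowelsB ch then
          let run := st.1 + 1
          (run, if 3 ≤ run then st.2 + 1 else st.2)
        else (0, st.2)) (r, cnt)).2 = cnt + bcount r l := by
  induction l with
  | nil => intro r cnt; simp [bcount]
  | cons a t ih =>
    intro r cnt
    have hof : pvVowelsB = pvVowelsA := by decide
    have hvB : PySem.Set.contains pvVowelsB a = isV a := by
      rw [hof]; rfl
    by_cases hv : isV a
    · simp only [List.foldl_cons, hvB, hv, if_true]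
      rw [ih]
      simp only [bcount, hv, if_true]
      split_ifs <;> ring
    · simp only [List.foldl_cons, hvB, hv, Bool.false_eq_true, if_false]
      rw [ih]
      simp only [bcount, hv, Bool.false_eq_true, if_false]

lemma rangefold (l : List Char) : ∀ (c : Int),
    (List.range (l.length - 2)).foldl
      (fun count k =>
        if isV (l.getD k ' ') && isV (l.getD (k + 1) ' ') && isV (l.getD (k + 2) ' ')
        then count + 1 else count) c = c + tcount l := by
  induction l with
  | nil => intro c; simp [tcount]
  | cons a t ih =>
    intro c
    by_cases ht : 2 ≤ t.length
    · have hlen : (a :: t).length - 2 = (t.length - 2) + 1 := by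
        simp [List.length_cons]; omega
      rw [hlen, List.range_succ_eq_map, List.foldl_cons, List.foldl_map]
      have hbody : (fun (count : Int) (k : Nat) =>
            if isV ((a :: t).getD (k + 1) ' ') && isV ((a :: t).getD (k + 1 + 1) ' ')
                && isV ((a :: t).getD (k + 1 + 2) ' ')
            then count + 1 else count)
          = (fun (count : Int) (k : Nat) =>
            if isV (t.getD k ' ') && isV (t.getD (k + 1) ' ') && isV (t.getD (k + 2) ' ')
            then count + 1 else count) := by
        funext count k
        simp [Nat.add_assoc]
      simp only [Nat.zero_add] at *
      rw [hbody, ih]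
      rw [tcount_cons]
      simp only [List.getD_cons_zero, List.getD_cons_succ]
      split_ifs <;> ring
    · have hlen : (a :: t).length - 2 = 0 := by simp [List.length_cons]; omega
      rw [hlen]
      simp only [List.range_zero, List.foldl_nil]
      rw [tcount_short (a :: t) (by simp [List.length_cons]; omega)]
      ring

lemma portA_eq_tcount (l : List Char) :
    (PySem.List.pyRange 0 ((l.length : Int) - 2) 1).foldl
      (fun count i =>
        if pvVowelsA.contains (PySem.List.pyGetD l i ' ')
            && pvVowelsA.contains (PySem.List.pyGetD l (i + 1) ' ')
            && pvVowelsA.contains (PySem.List.pyGetD l (i + 2) ' ')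
        then count + 1 else count) 0 = tcount l := by
  rw [PySem.List.pyRange_one, List.foldl_map]
  have hbody : (fun (count : Int) (k : Nat) =>
        if pvVowelsA.contains (PySem.List.pyGetD l (0 + (k : Int)) ' ')
            && pvVowelsA.contains (PySem.List.pyGetD l (0 + (k : Int) + 1) ' ')
            && pvVowelsA.contains (PySem.List.pyGetD l (0 + (k : Int) + 2) ' ')
        then count + 1 else count)
      = (fun (count : Int) (k : Nat) =>
        if isV (l.getD k ' ') && isV (l.getD (k + 1) ' ') && isV (l.getD (k + 2) ' ')
        then count + 1 else count) := by
    funext count k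
    have h1 : (0 : Int) + (k : Int) = ((k : Nat) : Int) := by ring
    have h2 : ((k : Nat) : Int) + 1 = ((k + 1 : Nat) : Int) := by push_cast; ring
    have h3 : ((k : Nat) : Int) + 2 = ((k + 2 : Nat) : Int) := by push_cast; ring
    rw [h1, h2, h3, PySem.List.pyGetD_natCast, PySem.List.pyGetD_natCast,
      PySem.List.pyGetD_natCast]
    rfl
  have hn : (((l.length : Int) - 2) - 0).toNat = l.length - 2 := by omega
  rw [hbody, hn, rangefold]
  ring

-- ===== VERDICT (by name: the statement is the Claim_ definition above) =====
theorem count_vowel_triplets_spec : Claim_equal_count_vowel_triplets := by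
  intro text _
  unfold Spec_count_vowel_triplets count_vowel_triplets count_vowel_triplets_alt
  rw [foldB, portA_eq_tcount, bcount_eq _ 0 le_rfl]
  norm_num
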